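-- pv_equiv track=rewrite | github.com/cute3954/Solving-Foundations-of-Programming | problem-solving-with-python/maxSpan.py | find_largest_span
-- ===== SOURCE A (Python) =====
-- def find_largest_span(intArr):
--     max = 0
--     for i in range(len(intArr)):
--         j = len(intArr) - 1
--         while intArr[i] != intArr[j]:
--             # pythonで++とか--を入れると、エラーを吐く
--             j-=1
--         span = j - i + 1
--         if span > max:
--             max = span
--     return max
-- ===== SOURCE B (Python) =====
-- def find_largest_span(intArr):
--     # One pass to record the last occurrence index of every value,
--     # then one pass computing span = last[v] - i + 1.
--     last = {}
--     for i, v in enumerate(intArr):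
--         last[v] = i
--     best = 0
--     for i, v in enumerate(intArr):
--         span = last[v] - i + 1
--         if span > best:
--             best = span
--     return best
-- ===== Notes on version B (the rewrite author's own statement) =====
-- stated objective: faster
-- what changed: replaced the per-element backward scan for the matching last element by a single pass that stores each value's last occurrence index in a dict, then one pass over the array computes the spans
import Mathlib
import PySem

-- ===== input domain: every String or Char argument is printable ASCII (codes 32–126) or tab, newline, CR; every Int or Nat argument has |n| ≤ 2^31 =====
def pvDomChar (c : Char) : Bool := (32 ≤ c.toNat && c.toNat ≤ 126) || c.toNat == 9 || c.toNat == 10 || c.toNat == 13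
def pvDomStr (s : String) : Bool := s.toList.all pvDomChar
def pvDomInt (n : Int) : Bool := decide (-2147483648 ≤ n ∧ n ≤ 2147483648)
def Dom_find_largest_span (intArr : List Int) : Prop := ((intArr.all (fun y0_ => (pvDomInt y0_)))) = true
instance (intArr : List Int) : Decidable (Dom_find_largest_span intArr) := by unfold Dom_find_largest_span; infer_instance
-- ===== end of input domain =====

-- B replaces A's quadratic backward scan with a last-occurrence dict built in one pass (objective: faster).

-- ===== PORT A =====
-- the 'while intArr[i] != intArr[j]: j -= 1' loop, scanning j downward from len-1;
-- the base case j = 0 returns 0: for the caller j starts at len-1 ≥ i and arr[i] = x,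
-- so the loop always stops at some j ≥ i and negative indices are unreachable.
def scanBackA (arr : List Int) (x : Int) : Nat → Nat
  | 0 => 0
  | j+1 => if arr.getD (j+1) 0 = x then j + 1 else scanBackA arr x j

def find_largest_span (intArr : List Int) : Int :=
  (PySem.List.pyRange 0 intArr.length 1).foldl (fun mx i =>
    let j := scanBackA intArr (PySem.List.pyGetD intArr i 0) (intArr.length - 1)
    let span : Int := (j : Int) - i + 1
    if mx < span then span else mx) 0

-- ===== PORT B =====
def find_largest_span_alt (intArr : List Int) : Int :=
  let last := (PySem.List.enumerate intArr).foldl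
      (fun d p => d.insert p.2 p.1) (PySem.Dict.empty : PySem.Dict Int Int)
  (PySem.List.enumerate intArr).foldl (fun best p =>
    let span := last.getD p.2 0 - p.1 + 1   -- Python last[v]; the key is always present
    if best < span then span else best) 0

-- ===== PRECONDITION & SPEC =====
def Spec_find_largest_span (intArr : List Int) (out : Int) : Prop := out = find_largest_span_alt intArr
instance (intArr : List Int) (out : Int) : Decidable (Spec_find_largest_span intArr out) := by unfold Spec_find_largest_span; infer_instance

-- ===== CLAIM (what is proved, stated in full; the proofs are below) =====
def Claim_equal_find_largest_span : Prop := ∀ (intArr : List Int), Dom_find_largest_span intArr → Spec_find_largest_span intArr (find_largest_span intArr)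

-- ===== LEMMAS AND PROOFS =====

-- A's backward scan returns the GREATEST index ≤ j holding value x (given one exists ≤ j).
theorem scanBackA_spec (arr : List Int) (x : Int) (j : Nat)
    (h : ∃ k, k ≤ j ∧ arr.getD k 0 = x) :
    scanBackA arr x j ≤ j ∧ arr.getD (scanBackA arr x j) 0 = x ∧
      ∀ k, k ≤ j → arr.getD k 0 = x → k ≤ scanBackA arr x j := by
  induction j with
  | zero =>
    obtain ⟨k, hk, hkx⟩ := h
    interval_cases k
    exact ⟨le_refl 0, hkx, fun k hk _ => hk⟩
  | succ j ih =>
    by_cases hj : arr.getD (j + 1) 0 = x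
    · simp only [scanBackA, if_pos hj]
      exact ⟨le_refl _, hj, fun k hk _ => hk⟩
    · have h' : ∃ k, k ≤ j ∧ arr.getD k 0 = x := by
        obtain ⟨k, hk, hkx⟩ := h
        have : k ≠ j + 1 := fun he => hj (he ▸ hkx)
        exact ⟨k, by omega, hkx⟩
      obtain ⟨h1, h2, h3⟩ := ih h'
      simp only [scanBackA, if_neg hj]
      refine ⟨by omega, h2, fun k hk hkx => ?_⟩
      have : k ≠ j + 1 := fun he => hj (he ▸ hkx)
      exact h3 k (by omega) hkx

-- B's dict holds the greatest index at which each value of the list occurs.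
theorem lastDict_spec (arr : List Int) (v : Int) (hv : v ∈ arr) :
    ∃ m : Nat,
      ((PySem.List.enumerate arr).foldl (fun d p => d.insert p.2 p.1)
        (PySem.Dict.empty : PySem.Dict Int Int)).getD v 0 = (m : Int)
      ∧ m < arr.length ∧ arr.getD m 0 = v
      ∧ ∀ k, k < arr.length → arr.getD k 0 = v → k ≤ m := by
  induction arr using List.reverseRecOn with
  | nil => simp at hv
  | append_singleton as a ih =>
    have hfold : (PySem.List.enumerate (as ++ [a])).foldl (fun d p => d.insert p.2 p.1)
        (PySem.Dict.empty : PySem.Dict Int Int)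
        = ((PySem.List.enumerate as).foldl (fun d p => d.insert p.2 p.1)
            (PySem.Dict.empty : PySem.Dict Int Int)).insert a ((0 : Int) + as.length) := by
      rw [PySem.List.enumerate_append, List.foldl_append]
      simp [PySem.List.enumerate]
    by_cases hva : v = a
    · refine ⟨as.length, ?_, by simp, ?_, fun k hk hkx => by simp at hk; omega⟩
      · rw [hfold, PySem.Dict.getD_insert]
        simp [hva]
      · subst hva
        simp [List.getD_eq_getElem?_getD]
    · have hv' : v ∈ as := by
        rcases List.mem_append.mp hv with h | h
        · exact h
        · simp at h; exact absurd h hva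
      obtain ⟨m, hm1, hm2, hm3, hm4⟩ := ih hv'
      refine ⟨m, ?_, by simp; omega, ?_, fun k hk hkx => ?_⟩
      · rw [hfold, PySem.Dict.getD_insert, if_neg hva]
        exact hm1
      · rw [List.getD_eq_getElem?_getD, List.getElem?_append_left hm2,
            ← List.getD_eq_getElem?_getD]
        exact hm3
      · have hk' : k < as.length := by
          by_contra hge
          have hk1 : k = as.length := by simp at hk; omega
          subst hk1
          rw [List.getD_eq_getElem?_getD] at hkx
          simp at hkx
          exact hva hkx.symm
        apply hm4 k hk'
        rwa [List.getD_eq_getElem?_getD, List.getElem?_append_left hk',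
             ← List.getD_eq_getElem?_getD] at hkx

theorem main_aux (arr : List Int) (D : PySem.Dict Int Int)
    (hD : ∀ v ∈ arr, ∃ m : Nat, D.getD v 0 = (m : Int) ∧ m < arr.length ∧ arr.getD m 0 = v
            ∧ ∀ k, k < arr.length → arr.getD k 0 = v → k ≤ m) :
    find_largest_span arr =
      (PySem.List.enumerate arr).foldl (fun best p =>
        if best < D.getD p.2 0 - p.1 + 1 then D.getD p.2 0 - p.1 + 1 else best) 0 := by
  rw [PySem.List.enumerate_eq_map_pyRange (d := 0), List.foldl_map]
  unfold find_largest_span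
  simp only [PySem.List.len_eq]
  apply PySem.List.foldl_congr_mem
  intro acc i hi
  rw [PySem.List.mem_pyRange_one] at hi
  obtain ⟨hi0, hilen⟩ := hi
  obtain ⟨n, rfl⟩ : ∃ n : Nat, i = (n : Int) := ⟨i.toNat, (Int.toNat_of_nonneg hi0).symm⟩
  have hn : n < arr.length := by exact_mod_cast hilen
  rw [PySem.List.pyGetD_natCast]
  have hmem : arr.getD n 0 ∈ arr := by
    rw [List.getD_eq_getElem arr 0 hn]
    exact List.getElem_mem hn
  obtain ⟨m, hm1, hm2, hm3, hm4⟩ := hD _ hmem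
  obtain ⟨hr1, hr2, hr3⟩ := scanBackA_spec arr (arr.getD n 0) (arr.length - 1)
    ⟨n, by omega, rfl⟩
  have heq : scanBackA arr (arr.getD n 0) (arr.length - 1) = m := by
    have h1 : scanBackA arr (arr.getD n 0) (arr.length - 1) ≤ m :=
      hm4 _ (by omega) hr2
    have h2 : m ≤ scanBackA arr (arr.getD n 0) (arr.length - 1) :=
      hr3 m (by omega) hm3
    omega
  rw [heq, hm1]

-- ===== VERDICT (by name: the statement is the Claim_ definition above) =====
theorem find_largest_span_spec : Claim_equal_find_largest_span := by
  intro arr _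
  unfold Spec_find_largest_span find_largest_span_alt
  simp only []
  exact main_aux arr _ (fun v hv => lastDict_spec arr v hv)
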